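-- pv_equiv track=rewrite | github.com/Loldude0/hackmit-25 | suno/audio_generator.py | _chord_progression_to_notes
-- ===== SOURCE A (Python) =====
-- from typing import Dict, Any, List
--
-- def _chord_progression_to_notes(progression: str) -> List[List[int]]:
--     """Convert chord progression string to MIDI note numbers"""
--     chord_map = {
--         'C': [60, 64, 67],      # C major
--         'Cm': [60, 63, 67],     # C minor
--         'D': [62, 66, 69],      # D major
--         'Dm': [62, 65, 69],     # D minor
--         'E': [64, 68, 71],      # E major
--         'Em': [64, 67, 71],     # E minor
--         'F': [65, 69, 72],      # F major
--         'Fm': [65, 68, 72],    # F minor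
--         'G': [67, 71, 74],      # G major
--         'Gm': [67, 70, 74],     # G minor
--         'A': [69, 73, 76],      # A major
--         'Am': [69, 72, 76],     # A minor
--         'B': [71, 75, 78],      # B major
--         'Bm': [71, 74, 78],     # B minor
--     }
--
--     chords = []
--     chord_strings = progression.split('-')
--
--     for chord_str in chord_strings:
--         chord_str = chord_str.strip()
--         if chord_str in chord_map:
--             chords.append(chord_map[chord_str])
--         else:
--             # Default to C major if chord not found
--             chords.append(chord_map['C'])
--
--     return chords
-- ===== SOURCE B (Python) =====
-- from typing import List
--
-- _ROOTS = {'C': 60, 'D': 62, 'E': 64, 'F': 65, 'G': 67, 'A': 69, 'B': 71}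
--
-- def _triad(token: str) -> List[int]:
--     minor = token.endswith('m')
--     root = token[:-1] if minor else token
--     base = _ROOTS.get(root)
--     if base is None:
--         return [60, 64, 67]  # default: C major
--     return [base, base + (3 if minor else 4), base + 7]
--
-- def _chord_progression_to_notes(progression: str) -> List[List[int]]:
--     """Convert chord progression string to MIDI note numbers"""
--     return [_triad(tok.strip()) for tok in progression.split('-')]
-- ===== Notes on version B (the rewrite author's own statement) =====
-- stated objective: simpler
-- what changed: Replaces the 14-entry chord-to-triad lookup table and accumulator loop with a 7-entry root map and a comprehension that detects the minor suffix and computes each triad arithmetically as root, root plus a third (minor or major), root plus a fifth.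
import Mathlib
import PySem

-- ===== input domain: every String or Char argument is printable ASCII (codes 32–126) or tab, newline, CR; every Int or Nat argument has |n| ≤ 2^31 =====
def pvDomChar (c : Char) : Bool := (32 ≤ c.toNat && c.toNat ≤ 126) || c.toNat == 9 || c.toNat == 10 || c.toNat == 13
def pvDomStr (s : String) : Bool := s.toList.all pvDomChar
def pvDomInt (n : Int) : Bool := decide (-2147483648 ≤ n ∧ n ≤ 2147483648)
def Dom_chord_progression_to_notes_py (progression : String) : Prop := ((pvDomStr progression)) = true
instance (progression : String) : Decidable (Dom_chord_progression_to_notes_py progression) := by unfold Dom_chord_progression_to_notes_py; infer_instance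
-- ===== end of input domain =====

-- B replaces A's 14-entry chord→triad table and accumulator loop by a 7-entry root map plus
-- arithmetic triad construction [base, base+(3 or 4), base+7] in a comprehension (objective: simpler).

-- ===== PORT A =====
def pvChordMap : PySem.Dict String (List Int) := PySem.Dict.ofList
  [("C",  [60, 64, 67]), ("Cm", [60, 63, 67]),
   ("D",  [62, 66, 69]), ("Dm", [62, 65, 69]),
   ("E",  [64, 68, 71]), ("Em", [64, 67, 71]),
   ("F",  [65, 69, 72]), ("Fm", [65, 68, 72]),
   ("G",  [67, 71, 74]), ("Gm", [67, 70, 74]),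
   ("A",  [69, 73, 76]), ("Am", [69, 72, 76]),
   ("B",  [71, 75, 78]), ("Bm", [71, 74, 78])]

def chord_progression_to_notes_py (progression : String) : List (List Int) :=
  -- '-' is a nonempty separator, so split? always returns some; getD [] only unwraps it
  ((PySem.Str.split? progression "-").getD []).foldl
    (fun chords chord_str =>
      let t := PySem.Str.strip chord_str
      -- 'if t in chord_map: chords.append(chord_map[t]) else: chords.append(chord_map['C'])'
      match pvChordMap.get? t with
      | some triad => chords ++ [triad]
      | none => chords ++ [[60, 64, 67]]) []

-- ===== PORT B =====
def pvRoots : PySem.Dict String Int := PySem.Dict.ofList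
  [("C", 60), ("D", 62), ("E", 64), ("F", 65), ("G", 67), ("A", 69), ("B", 71)]

def pvTriad (token : String) : List Int :=
  let minor := PySem.Str.endswith token "m"
  let root := if minor then PySem.Str.slice token none (some (-1)) else token
  match pvRoots.get? root with
  | none => [60, 64, 67]
  | some base => [base, base + (if minor then 3 else 4), base + 7]

def chord_progression_to_notes_py_alt (progression : String) : List (List Int) :=
  ((PySem.Str.split? progression "-").getD []).map
    (fun tok => pvTriad (PySem.Str.strip tok))

-- ===== PRECONDITION & SPEC =====
def Spec_chord_progression_to_notes_py (progression : String) (out : List (List Int)) : Prop := out = chord_progression_to_notes_py_alt progression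
instance (progression : String) (out : List (List Int)) : Decidable (Spec_chord_progression_to_notes_py progression out) := by unfold Spec_chord_progression_to_notes_py; infer_instance

-- ===== CLAIM (what is proved, stated in full; the proofs are below) =====
def Claim_equal_chord_progression_to_notes_py : Prop := ∀ (progression : String), Dom_chord_progression_to_notes_py progression → Spec_chord_progression_to_notes_py progression (chord_progression_to_notes_py progression)

-- ===== LEMMAS AND PROOFS =====

-- the two dict literals, with their items lists exposed
lemma pvChordMap_mk : pvChordMap = PySem.Dict.mk
  [("C",  [60, 64, 67]), ("Cm", [60, 63, 67]),
   ("D",  [62, 66, 69]), ("Dm", [62, 65, 69]),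
   ("E",  [64, 68, 71]), ("Em", [64, 67, 71]),
   ("F",  [65, 69, 72]), ("Fm", [65, 68, 72]),
   ("G",  [67, 71, 74]), ("Gm", [67, 70, 74]),
   ("A",  [69, 73, 76]), ("Am", [69, 72, 76]),
   ("B",  [71, 75, 78]), ("Bm", [71, 74, 78])] := by decide

lemma pvRoots_mk : pvRoots = PySem.Dict.mk
  [("C", 60), ("D", 62), ("E", 64), ("F", 65), ("G", 67), ("A", 69), ("B", 71)] := by decide

-- a string ending in 'm' is its own dropLast plus 'm'
lemma endswith_m_split (t : String) (h : PySem.Str.endswith t "m" = true) :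
    t.toList = t.toList.dropLast ++ ['m'] := by
  have h3 : ('m' :: []) <:+ t.toList := by
    have := PySem.Str.endswith_eq t "m"
    rw [← this] at *
    exact (PySem.Chars.endswith_iff _ _).mp h
  obtain ⟨l, hl⟩ := h3
  simp [← hl]

lemma slice_neg_one_toList (t : String) :
    (PySem.Str.slice t none (some (-1))).toList = t.toList.dropLast := by
  simp [PySem.Str.toList_slice, PySem.Chars.slice_eq_listSlice, PySem.List.slice_to_neg_one]

-- the heart: A's table lookup (with C-major default) equals B's computed triad, per token
lemma tok_eq (t : String) :
    (match pvChordMap.get? t with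
     | some triad => triad
     | none => [60, 64, 67]) = pvTriad t := by
  by_cases h1 : t = "C";  · subst h1; decide
  by_cases h2 : t = "Cm"; · subst h2; decide
  by_cases h3 : t = "D";  · subst h3; decide
  by_cases h4 : t = "Dm"; · subst h4; decide
  by_cases h5 : t = "E";  · subst h5; decide
  by_cases h6 : t = "Em"; · subst h6; decide
  by_cases h7 : t = "F";  · subst h7; decide
  by_cases h8 : t = "Fm"; · subst h8; decide
  by_cases h9 : t = "G";  · subst h9; decide
  by_cases h10 : t = "Gm"; · subst h10; decide
  by_cases h11 : t = "A";  · subst h11; decide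
  by_cases h12 : t = "Am"; · subst h12; decide
  by_cases h13 : t = "B";  · subst h13; decide
  by_cases h14 : t = "Bm"; · subst h14; decide
  -- t is none of the 14 keys: A yields the default
  have hA : pvChordMap.get? t = none := by
    rw [pvChordMap_mk]
    simp [PySem.Dict.get?, beq_iff_eq, Ne.symm h1, Ne.symm h2, Ne.symm h3,
      Ne.symm h4, Ne.symm h5, Ne.symm h6, Ne.symm h7, Ne.symm h8, Ne.symm h9,
      Ne.symm h10, Ne.symm h11, Ne.symm h12, Ne.symm h13, Ne.symm h14]
  rw [hA]
  -- B's root lookup must also miss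
  cases hm : PySem.Str.endswith t "m" with
  | false =>
    have hm' : PySem.Chars.endswith t.toList ['m'] = false := by
      rw [PySem.Str.endswith_eq] at hm; simpa using hm
    have hB : pvRoots.get? t = none := by
      rw [pvRoots_mk]
      simp [PySem.Dict.get?, beq_iff_eq, Ne.symm h1, Ne.symm h3, Ne.symm h5,
        Ne.symm h7, Ne.symm h9, Ne.symm h11, Ne.symm h13]
    simp [pvTriad, hm', hB]
  | true =>
    have hm' : PySem.Chars.endswith t.toList ['m'] = true := by
      rw [PySem.Str.endswith_eq] at hm; simpa using hm
    have hsplit := endswith_m_split t hm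
    have hr := slice_neg_one_toList t
    have key : ∀ (k km : String), km.toList = k.toList ++ ['m'] → t ≠ km →
        k ≠ PySem.Str.slice t none (some (-1)) := by
      intro k km hkm hne h
      apply hne
      apply String.ext
      rw [hsplit, ← hr, ← h, hkm]
    have hB : pvRoots.get? (PySem.Str.slice t none (some (-1))) = none := by
      rw [pvRoots_mk]
      simp [PySem.Dict.get?, beq_iff_eq,
        key "C" "Cm" (by decide) h2, key "D" "Dm" (by decide) h4,
        key "E" "Em" (by decide) h6, key "F" "Fm" (by decide) h8,
        key "G" "Gm" (by decide) h10, key "A" "Am" (by decide) h12,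
        key "B" "Bm" (by decide) h14]
    simp [pvTriad, hm', hB]

-- the accumulator loop is the comprehension
lemma foldl_eq_map (ts : List String) (acc : List (List Int)) :
    ts.foldl
      (fun chords chord_str =>
        let t := PySem.Str.strip chord_str
        match pvChordMap.get? t with
        | some triad => chords ++ [triad]
        | none => chords ++ [[60, 64, 67]]) acc
    = acc ++ ts.map (fun tok => pvTriad (PySem.Str.strip tok)) := by
  induction ts generalizing acc with
  | nil => simp
  | cons hd tl ih =>
    have hstep :
        (let t := PySem.Str.strip hd
         match pvChordMap.get? t with
         | some triad => acc ++ [triad]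
         | none => acc ++ [[60, 64, 67]])
        = acc ++ [pvTriad (PySem.Str.strip hd)] := by
      rw [← tok_eq (PySem.Str.strip hd)]
      show (match pvChordMap.get? (PySem.Str.strip hd) with
            | some triad => acc ++ [triad]
            | none => acc ++ [[60, 64, 67]]) = _
      cases pvChordMap.get? (PySem.Str.strip hd) <;> rfl
    simp only [List.foldl_cons, List.map_cons]
    rw [hstep, ih]
    simp

-- ===== VERDICT (by name: the statement is the Claim_ definition above) =====
theorem chord_progression_to_notes_py_spec : Claim_equal_chord_progression_to_notes_py := by
  intro progression _
  unfold Spec_chord_progression_to_notes_py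
  unfold chord_progression_to_notes_py chord_progression_to_notes_py_alt
  rw [foldl_eq_map]
  simp
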